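-- pv_equiv track=rewrite | github.com/gary-git-WV/fruition | Codewars/Mumbling/solution.py | accum
-- ===== SOURCE A (Python) =====
-- def accum(st):
--     # The function that Does The Magic
--     queue = ''
--     # There's a hidden elephant trap in this problem
--     charindex = 0
--     while charindex < len(st):
--         char = st[charindex]
--         temp = ''
--         count = 1
--         index = (charindex + 1)
--         while count <= index:
--             temp += st[charindex]
--             count += 1
--         index += 1
--         if index <= len(st):
--             queue += temp.capitalize() + '-'
--         else:
--             queue += temp.capitalize()
--         charindex += 1
--     return queue
-- ===== SOURCE B (Python) =====
-- def accum(st):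
--     return '-'.join(c.upper() + c.lower() * i for i, c in enumerate(st))
-- ===== Notes on version B (the rewrite author's own statement) =====
-- stated objective: faster
-- what changed: Replaced the hand-rolled index-counting while loops (inner character-repetition loop building temp by repeated concatenation, plus an explicit separator branch) by a single enumerate pass computing each segment in closed form with string multiplication and joining all segments at once.
import Mathlib
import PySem

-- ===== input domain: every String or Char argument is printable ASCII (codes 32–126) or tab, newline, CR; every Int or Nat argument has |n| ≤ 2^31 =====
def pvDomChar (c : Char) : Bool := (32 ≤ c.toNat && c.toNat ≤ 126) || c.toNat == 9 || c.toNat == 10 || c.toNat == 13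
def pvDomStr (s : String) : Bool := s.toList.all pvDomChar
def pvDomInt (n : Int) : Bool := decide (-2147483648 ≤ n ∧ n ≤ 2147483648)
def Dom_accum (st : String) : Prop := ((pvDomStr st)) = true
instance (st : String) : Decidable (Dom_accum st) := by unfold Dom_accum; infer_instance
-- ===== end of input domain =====

-- B replaces A's two index-counting while loops (repeated concatenation) and separator
-- branch by one enumerate pass with closed-form segments and a single join (measured faster).

-- ===== PORT A =====
-- temp.capitalize(): first character uppercased, the rest lowercased (exact on ASCII)
def pvCapitalize (cs : List Char) : List Char :=
  match cs with
  | [] => []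
  | c :: rest => PySem.Chars.upperChar c :: rest.map PySem.Chars.lowerChar

-- inner loop: while count <= index: temp += st[charindex]; count += 1
def accumTemp (cs : List Char) (charindex : Nat) (count index : Nat) (temp : List Char) : List Char :=
  if count ≤ index then
    accumTemp cs charindex (count + 1) index (temp ++ [(PySem.List.pyGet? cs (charindex : Int)).getD ' '])
  else temp
termination_by index + 1 - count

-- outer loop: while charindex < len(st)
def accumLoop (cs : List Char) (charindex : Nat) (queue : List Char) : List Char :=
  if charindex < cs.length then
    let temp := accumTemp cs charindex 1 (charindex + 1) []
    let index := (charindex + 1) + 1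
    let queue' := if index ≤ cs.length then queue ++ pvCapitalize temp ++ ['-']
                  else queue ++ pvCapitalize temp
    accumLoop cs (charindex + 1) queue'
  else queue
termination_by cs.length - charindex

def accum (st : String) : String := String.ofList (accumLoop st.toList 0 [])

-- ===== PORT B =====
-- '-'.join(c.upper() + c.lower() * i for i, c in enumerate(st))
def accum_alt (st : String) : String :=
  PySem.Str.join "-"
    ((PySem.List.enumerate st.toList 0).map
      (fun p => String.ofList (PySem.Chars.upperChar p.2 :: PySem.List.pyRepeat [PySem.Chars.lowerChar p.2] p.1)))

-- ===== PRECONDITION & SPEC =====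
def Spec_accum (st : String) (out : String) : Prop := out = accum_alt st
instance (st : String) (out : String) : Decidable (Spec_accum st out) := by unfold Spec_accum; infer_instance

-- ===== CLAIM (what is proved, stated in full; the proofs are below) =====
def Claim_equal_accum : Prop := ∀ (st : String), Dom_accum st → Spec_accum st (accum st)

-- ===== LEMMAS AND PROOFS =====

-- the list of segments for characters of cs starting at absolute index i
def pvSegs : List Char → Nat → List (List Char)
  | [], _ => []
  | c :: rest, i =>
      (PySem.Chars.upperChar c :: List.replicate i (PySem.Chars.lowerChar c)) :: pvSegs rest (i + 1)

theorem accumTemp_eq (cs : List Char) (ci : Nat) (index : Nat) :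
    ∀ (count : Nat) (temp : List Char), count ≤ index + 1 →
    accumTemp cs ci count index temp
      = temp ++ List.replicate (index + 1 - count) ((PySem.List.pyGet? cs (ci : Int)).getD ' ') := by
  intro count temp h
  induction hn : index + 1 - count generalizing count temp with
  | zero =>
      rw [accumTemp]
      have : ¬ count ≤ index := by omega
      simp [this]
  | succ n ih =>
      rw [accumTemp]
      have hc : count ≤ index := by omega
      simp only [hc, if_pos]
      rw [ih (count + 1) _ (by omega) (by omega)]
      simp only [List.append_assoc, List.singleton_append]
      simp [List.replicate_succ]

theorem capitalize_replicate (c : Char) (i : Nat) :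
    pvCapitalize (List.replicate (i + 1) c)
      = PySem.Chars.upperChar c :: List.replicate i (PySem.Chars.lowerChar c) := by
  simp [List.replicate_succ, pvCapitalize, List.map_replicate]

theorem accumLoop_eq (cs : List Char) : ∀ (ci : Nat) (queue : List Char), ci ≤ cs.length →
    accumLoop cs ci queue = queue ++ PySem.Chars.join ['-'] (pvSegs (cs.drop ci) ci) := by
  intro ci
  induction hn : cs.length - ci generalizing ci with
  | zero =>
      intro queue h
      have hci : ci = cs.length := by omega
      rw [accumLoop]
      simp [hci, List.drop_length, pvSegs, PySem.Chars.join_nil]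
  | succ n ih =>
      intro queue h
      have hlt : ci < cs.length := by omega
      rw [accumLoop]
      simp only [hlt, if_pos]
      have hget : (PySem.List.pyGet? cs (ci : Int)).getD ' ' = cs[ci] := by
        simp [PySem.List.pyGet?, PySem.List.pyIdx?, hlt]
      have htemp : accumTemp cs ci 1 (ci + 1) [] = List.replicate (ci + 1) cs[ci] := by
        rw [accumTemp_eq cs ci (ci + 1) 1 [] (by omega), hget]
        simp
      have hdrop : cs.drop ci = cs[ci] :: cs.drop (ci + 1) := by
        rw [List.drop_eq_getElem_cons hlt]
      rw [ih (ci + 1) (by omega) _ (by omega)]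
      rw [hdrop]
      simp only [pvSegs]
      by_cases hlast : ci + 1 + 1 ≤ cs.length
      · have hne : cs.drop (ci + 1) ≠ [] := by
          intro hnil
          have := List.length_drop (l := cs) (i := ci + 1)
          rw [hnil] at this
          simp at this; omega
        obtain ⟨d, ds, hds⟩ := List.exists_cons_of_ne_nil hne
        simp only [hlast, if_pos, htemp, capitalize_replicate, hds, pvSegs,
          PySem.Chars.join_cons_cons]
        simp
      · have hnil : cs.drop (ci + 1) = [] := by
          apply List.drop_eq_nil_of_le; omega
        simp [hlast, htemp, capitalize_replicate, hnil, pvSegs, PySem.Chars.join_singleton]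

theorem segs_eq_map_enumerate (cs : List Char) : ∀ (k : Nat),
    (PySem.List.enumerate cs (k : Int)).map
      (fun p => PySem.Chars.upperChar p.2 :: PySem.List.pyRepeat [PySem.Chars.lowerChar p.2] p.1)
      = pvSegs cs k := by
  induction cs with
  | nil => intro k; simp [PySem.List.enumerate_nil, pvSegs]
  | cons c rest ih =>
      intro k
      rw [PySem.List.enumerate_cons]
      simp only [List.map_cons, pvSegs]
      congr 1
      · rw [PySem.List.pyRepeat_singleton]
        simp
      · rw [show (k : Int) + 1 = ((k + 1 : Nat) : Int) by push_cast; ring]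
        exact ih (k + 1)

theorem accum_eq_alt (st : String) : accum st = accum_alt st := by
  unfold accum accum_alt
  rw [accumLoop_eq st.toList 0 [] (by omega), List.drop_zero, List.nil_append]
  have h3 : (PySem.Str.join "-"
      ((PySem.List.enumerate st.toList 0).map
        (fun p => String.ofList
          (PySem.Chars.upperChar p.2 :: PySem.List.pyRepeat [PySem.Chars.lowerChar p.2] p.1)))).toList
      = PySem.Chars.join ['-'] (pvSegs st.toList 0) := by
    rw [PySem.Str.toList_join, List.map_map]
    have h2 : (PySem.List.enumerate st.toList (0 : Int)).map
        (String.toList ∘ fun p => String.ofList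
          (PySem.Chars.upperChar p.2 :: PySem.List.pyRepeat [PySem.Chars.lowerChar p.2] p.1))
        = pvSegs st.toList 0 := by
      rw [show ((0 : Int)) = ((0 : Nat) : Int) by norm_num,
        ← segs_eq_map_enumerate st.toList 0]
      simp [Function.comp]
    rw [h2]
    rfl
  rw [← h3, String.ofList_toList]

-- ===== VERDICT (by name: the statement is the Claim_ definition above) =====
theorem accum_spec : Claim_equal_accum := by
  intro st _
  unfold Spec_accum
  exact accum_eq_alt st
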